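-- pv_equiv track=rewrite | github.com/jian-qi-chen/KernelPHash | KernelPHash.py | TextHash64_real
-- ===== SOURCE A (Python) =====
-- import os, sys, re, math
--
-- def TextHash64_real(textin):
--     # every paragraph generate a hash value of 64 bits
--     win_len = 8 # window length, in number of characters
--     para_len = 10 # paragraph length, in number of windows
--
--     # align with space
--     text_t = textin.split(' ')
--     text = ''
--     for txt_item in text_t:
--         sec_len = math.ceil( len(txt_item)/win_len )*win_len
--         new_item = txt_item+' '*(sec_len-len(txt_item))
--         text += new_item
--
--     txt_len = len(text)
--
--     round = int(txt_len/(win_len*para_len)) + 1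
--     remain_char = txt_len
--     hash_list = []
--     for i in range(round):
--         char_list = [0]*win_len # the list of character value sum, to generate hash
--         j = 0
--         while remain_char > 0 and j < para_len:
--             k = 0
--             while remain_char > 0 and k < win_len:
--                 char_list[k] += ord( text[i*(win_len*para_len)+j*win_len+k] )
--                 remain_char -= 1
--                 k += 1
--             j += 1
--
--         char_list = [ p%256 for p in char_list ]
--         hash_l = [ '%02x' % p for p in  char_list ]
--         hash = ''.join(hash_l)
--         hash_list.append(hash)
--
--     return hash_list
-- ===== SOURCE B (Python) =====
-- import math
--
-- def TextHash64_real(textin):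
--     # pad every space-split token with spaces to a multiple of the window length (8)
--     text = ''.join(t.ljust(math.ceil(len(t)/8)*8) for t in textin.split(' '))
--     rounds = len(text)//80 + 1
--     hash_list = []
--     for r in range(rounds):
--         chunk = text[r*80:(r+1)*80]
--         hash_list.append(''.join('%02x' % (sum(ord(c) for c in chunk[k::8]) % 256)
--                                  for k in range(8)))
--     return hash_list
-- ===== Notes on version B (the rewrite author's own statement) =====
-- stated objective: alternative
-- what changed: Replaces A's char-by-char nested while loops driven by a global remain_char counter and an in-place 8-slot accumulator with a chunk-then-column traversal: the padded text is cut into 80-char slices and each of the 8 hex bytes is the mod-256 sum of one strided column of the slice.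
import Mathlib
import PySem

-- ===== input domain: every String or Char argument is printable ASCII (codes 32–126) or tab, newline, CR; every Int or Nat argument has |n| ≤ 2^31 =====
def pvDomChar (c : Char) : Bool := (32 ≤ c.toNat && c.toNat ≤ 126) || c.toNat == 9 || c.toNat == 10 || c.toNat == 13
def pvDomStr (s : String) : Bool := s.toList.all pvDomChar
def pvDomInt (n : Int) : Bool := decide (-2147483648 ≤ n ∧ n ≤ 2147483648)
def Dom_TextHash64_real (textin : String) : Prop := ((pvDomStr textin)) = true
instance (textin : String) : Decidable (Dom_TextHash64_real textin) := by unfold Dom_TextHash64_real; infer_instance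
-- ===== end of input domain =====

-- B replaces A's char-by-char nested while loops (global remain_char counter, in-place
-- 8-slot accumulator) by cutting the padded text into 80-char chunks and summing each
-- of the 8 strided columns of a chunk; same O(n) cost, different traversal (objective: alternative).

-- '%x' digit for 0 ≤ n < 16 (exact on that range, the only one used here)
def pvHexDigit (n : Nat) : Char :=
  if n < 10 then Char.ofNat (48 + n) else Char.ofNat (87 + n)

-- '%02x' % p for 0 ≤ p < 256 (hand port of the format string; exact on that range)
def pvHex02 (p : Int) : List Char :=
  [pvHexDigit (PySem.Int.floordiv p 16).toNat, pvHexDigit (PySem.Int.mod p 16).toNat]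

-- ===== PORT A =====
-- ord(text[i]); the loop guard remain_char > 0 keeps the index in range, so getD is exact
def pvOrdAt (text : List Char) (i : Nat) : Int := ((text.getD i ' ').toNat : Int)

-- inner 'while remain_char > 0 and k < win_len' loop
def pvAK (text : List Char) (b : Nat) (cl : List Int) (remain : Nat) (k : Nat) :
    List Int × Nat :=
  if _h : 0 < remain ∧ k < 8 then
    pvAK text b (cl.set k (cl.getD k 0 + pvOrdAt text (b + k))) (remain - 1) (k + 1)
  else (cl, remain)
termination_by 8 - k

-- middle 'while remain_char > 0 and j < para_len' loop
def pvAJ (text : List Char) (base : Nat) (cl : List Int) (remain : Nat) (j : Nat) :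
    List Int × Nat :=
  if _h : 0 < remain ∧ j < 10 then
    let ck := pvAK text (base + j * 8) cl remain 0
    pvAJ text base ck.1 ck.2 (j + 1)
  else (cl, remain)
termination_by 10 - j

-- 'for i in range(round)' loop, threading remain_char and hash_list
def pvAI (text : List Char) (rounds : Nat) (i : Nat) (remain : Nat) (acc : List String) :
    List String :=
  if _h : i < rounds then
    let r := pvAJ text (i * 80) (List.replicate 8 0) remain 0
    let hash := String.ofList ((r.1.map (fun p => pvHex02 (PySem.Int.mod p 256))).flatten)
    pvAI text rounds (i + 1) r.2 (acc ++ [hash])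
  else acc
termination_by rounds - i

def TextHash64_real (textin : String) : List String :=
  -- math.ceil(len/8)*8 on an integer length is ((len+7)/8)*8 (exact: float ceil is exact here)
  let text := (PySem.Chars.splitOn textin.toList [' ']).foldl
    (fun acc t => acc ++ (t ++ List.replicate (((t.length + 7) / 8) * 8 - t.length) ' ')) []
  -- int(txt_len/80) on an integer is txt_len / 80 (exact float division + truncation here)
  let rounds := text.length / 80 + 1
  pvAI text rounds 0 text.length []

-- ===== PORT B =====
-- t.ljust(w) (pads with spaces on the right)
def pvLjust (t : List Char) (w : Nat) : List Char := t ++ List.replicate (w - t.length) ' '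

-- xs[k::8] for k ≥ 0 is drop k then every 8th element (hand port of the strided slice; exact)
def pvStride8 : List Char → List Char
  | [] => []
  | c :: rest => c :: pvStride8 (rest.drop 7)
termination_by l => l.length
decreasing_by simp

-- sum(ord(c) for c in chunk[k::8]) % 256
def pvColByte (chunk : List Char) (k : Nat) : Int :=
  PySem.Int.mod (((pvStride8 (chunk.drop k)).map (fun c => (c.toNat : Int))).sum) 256

def TextHash64_real_alt (textin : String) : List String :=
  let text := (PySem.Chars.splitOn textin.toList [' ']).flatMap
    (fun t => pvLjust t (((t.length + 7) / 8) * 8))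
  let rounds := text.length / 80 + 1
  (List.range rounds).map (fun r =>
    let chunk := (text.drop (r * 80)).take 80   -- text[r*80:(r+1)*80], nonnegative bounds
    String.ofList ((List.range 8).flatMap (fun k => pvHex02 (pvColByte chunk k))))

-- ===== PRECONDITION & SPEC =====
def Spec_TextHash64_real (textin : String) (out : List String) : Prop := out = TextHash64_real_alt textin
instance (textin : String) (out : List String) : Decidable (Spec_TextHash64_real textin out) := by unfold Spec_TextHash64_real; infer_instance

-- ===== CLAIM (what is proved, stated in full; the proofs are below) =====
def Claim_equal_TextHash64_real : Prop := ∀ (textin : String), Dom_TextHash64_real textin → Spec_TextHash64_real textin (TextHash64_real textin)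

-- ===== LEMMAS AND PROOFS =====

-- raw column sum of a chunk (B's pvColByte before the % 256)
def pvColRaw (chunk : List Char) (k : Nat) : Int :=
  ((pvStride8 (chunk.drop k)).map (fun c => (c.toNat : Int))).sum

-- pvAK without the remain counter: updates slots k..7
def pvAdd (text : List Char) (b : Nat) (cl : List Int) (k : Nat) : List Int :=
  if _h : k < 8 then
    pvAdd text b (cl.set k (cl.getD k 0 + pvOrdAt text (b + k))) (k + 1)
  else cl
termination_by 8 - k

lemma pvMapRangeGetD (cl : List Int) (h : cl.length = 8) :
    (List.range 8).map (fun m => cl.getD m 0) = cl := by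
  apply List.ext_getElem
  · simp [h]
  · intro i h1 h2
    simp only [List.getElem_map, List.getElem_range]
    exact List.getD_eq_getElem cl 0 h2

lemma pvAK_eq_pvAdd (text : List Char) (b : Nat) :
    ∀ n k cl remain, 8 - k = n → k ≤ 8 → 8 - k ≤ remain →
      pvAK text b cl remain k = (pvAdd text b cl k, remain - (8 - k)) := by
  intro n
  induction n with
  | zero =>
    intro k cl remain hn hk hr
    have hk8 : k = 8 := by omega
    subst hk8
    rw [pvAK, pvAdd]
    simp
  | succ n ih =>
    intro k cl remain hn hk hr
    have hk8 : k < 8 := by omega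
    have hrp : 0 < remain := by omega
    rw [pvAK, pvAdd]
    rw [dif_pos ⟨hrp, hk8⟩, dif_pos hk8]
    rw [ih (k + 1) _ (remain - 1) (by omega) (by omega) (by omega)]
    congr 1
    omega

lemma pvAdd_spec (text : List Char) (b : Nat) :
    ∀ n k cl, 8 - k = n → cl.length = 8 →
      pvAdd text b cl k =
        (List.range 8).map (fun m => cl.getD m 0 + if k ≤ m then pvOrdAt text (b + m) else 0) := by
  intro n
  induction n with
  | zero =>
    intro k cl hn hcl
    have hk : ¬ k < 8 := by omega
    rw [pvAdd, dif_neg hk]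
    have : ∀ m ∈ List.range 8, cl.getD m 0 + (if k ≤ m then pvOrdAt text (b + m) else 0)
        = cl.getD m 0 := by
      intro m hm
      rw [if_neg (by simp at hm; omega)]
      ring
    rw [List.map_congr_left this, pvMapRangeGetD cl hcl]
  | succ n ih =>
    intro k cl hn hcl
    have hk : k < 8 := by omega
    rw [pvAdd, dif_pos hk]
    rw [ih (k + 1) _ (by omega) (by simp [hcl])]
    apply List.map_congr_left
    intro m hm
    simp only [List.mem_range] at hm
    have hkl : k < cl.length := by omega
    by_cases hmk : m = k
    · rw [if_pos (by omega : k ≤ m), if_neg (by omega : ¬ k + 1 ≤ m), hmk]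
      rw [List.getD_eq_getElem?_getD, List.getElem?_set_self hkl]
      simp
    · rw [List.getD_eq_getElem?_getD, List.getElem?_set_ne (fun h => hmk h.symm),
          ← List.getD_eq_getElem?_getD]
      by_cases hkm : k ≤ m
      · rw [if_pos hkm, if_pos (by omega)]
      · rw [if_neg hkm, if_neg (by omega)]

lemma pvStride8_window (w8 rest : List Char) (k : Nat)
    (hw : w8.length = 8) (hk : k < 8) :
    pvStride8 ((w8 ++ rest).drop k) = w8.getD k ' ' :: pvStride8 (rest.drop k) := by
  have hkw : k < w8.length := by omega
  rw [List.drop_append_of_le_length (by omega), List.drop_eq_getElem_cons hkw]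
  rw [List.cons_append, pvStride8]
  rw [List.getD_eq_getElem w8 ' ' hkw]
  congr 1
  rw [List.drop_append]
  have h7 : (List.drop (k + 1) w8).length = 7 - k := by simp [hw]
  rw [List.drop_eq_nil_of_le (by simp [hw]), h7]
  have hk7 : 7 - (7 - k) = k := by omega
  rw [hk7, List.nil_append]

lemma pvColRaw_window (w8 rest : List Char) (k : Nat) (hw : w8.length = 8) (hk : k < 8) :
    pvColRaw (w8 ++ rest) k = ((w8.getD k ' ').toNat : Int) + pvColRaw rest k := by
  unfold pvColRaw
  rw [pvStride8_window w8 rest k hw hk]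
  simp

lemma pvStride8_nil : pvStride8 [] = [] := by
  rw [pvStride8]

lemma pvColRaw_nil (k : Nat) : pvColRaw [] k = 0 := by
  simp [pvColRaw, pvStride8_nil]

lemma pvGetDMapRange (f : Nat → Int) (k : Nat) (hk : k < 8) :
    ((List.range 8).map f).getD k 0 = f k := by
  rw [List.getD_eq_getElem?_getD, List.getElem?_map, List.getElem?_range hk]
  rfl

lemma pvAJ_spec (text : List Char) (h8 : 8 ∣ text.length) (base : Nat) (h8b : 8 ∣ base) :
    ∀ n j cl, 10 - j = n → j ≤ 10 → cl.length = 8 →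
      pvAJ text base cl (text.length - (base + 8 * j)) j =
        ((List.range 8).map (fun k =>
            cl.getD k 0 + pvColRaw ((text.drop (base + 8 * j)).take (8 * (10 - j))) k),
         text.length - (base + 80)) := by
  intro n
  induction n with
  | zero =>
    intro j cl hn hj hcl
    have hj10 : j = 10 := by omega
    subst hj10
    rw [pvAJ, dif_neg (by omega : ¬(0 < text.length - (base + 8 * 10) ∧ 10 < 10))]
    have h2 : text.length - (base + 8 * 10) = text.length - (base + 80) := by omega
    rw [h2]
    simp only [Nat.sub_self, Nat.mul_zero, List.take_zero, pvColRaw_nil, add_zero]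
    rw [pvMapRangeGetD cl hcl]
  | succ n ih =>
    intro j cl hn hj hcl
    have hj10 : j < 10 := by omega
    by_cases hrem : 0 < text.length - (base + 8 * j)
    · have hlt : base + 8 * j < text.length := by omega
      have hrem8 : 8 ≤ text.length - (base + 8 * j) := by omega
      rw [pvAJ, dif_pos ⟨hrem, hj10⟩]
      rw [pvAK_eq_pvAdd text (base + j * 8) 8 0 cl (text.length - (base + 8 * j)) rfl
          (by omega) (by omega)]
      rw [pvAdd_spec text (base + j * 8) 8 0 cl rfl hcl]
      simp only
      have hr' : text.length - (base + 8 * j) - (8 - 0) = text.length - (base + 8 * (j + 1)) := by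
        omega
      rw [hr']
      rw [ih (j + 1) _ (by omega) (by omega) (by simp)]
      have h10 : 8 * (10 - j) = 8 + 8 * (10 - (j + 1)) := by omega
      have hdd : base + 8 * j + 8 = base + 8 * (j + 1) := by omega
      have hchunk : (text.drop (base + 8 * j)).take (8 * (10 - j)) =
          ((text.drop (base + 8 * j)).take 8) ++
            ((text.drop (base + 8 * (j + 1))).take (8 * (10 - (j + 1)))) := by
        rw [h10, List.take_add, List.drop_drop, hdd]
      have hw8 : ((text.drop (base + 8 * j)).take 8).length = 8 := by
        simp [List.length_take, List.length_drop]
        omega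
      congr 1
      apply List.map_congr_left
      intro k hk
      simp only [List.mem_range] at hk
      rw [hchunk, pvColRaw_window _ _ k hw8 hk]
      have hgd : ((List.range 8).map
          (fun m => cl.getD m 0 + if 0 ≤ m then pvOrdAt text (base + j * 8 + m) else 0)).getD k 0
          = cl.getD k 0 + pvOrdAt text (base + j * 8 + k) := by
        rw [pvGetDMapRange _ k hk, if_pos (Nat.zero_le k)]
      rw [hgd]
      have hkw : k < ((text.drop (base + 8 * j)).take 8).length := by omega
      have hkd : k < (text.drop (base + 8 * j)).length := by
        simp [List.length_drop]; omega
      have hval : ((text.drop (base + 8 * j)).take 8).getD k ' ' = text.getD (base + j * 8 + k) ' ' := by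
        rw [List.getD_eq_getElem _ ' ' hkw, List.getElem_take, List.getElem_drop,
            List.getD_eq_getElem _ ' ' (by simp [List.length_drop] at hkd ⊢; omega)]
        congr 1
        omega
      rw [hval]
      unfold pvOrdAt
      ring
    · have hle : text.length ≤ base + 8 * j := by omega
      rw [pvAJ, dif_neg (by omega : ¬(0 < text.length - (base + 8 * j) ∧ j < 10))]
      have h2 : text.length - (base + 8 * j) = text.length - (base + 80) := by omega
      rw [h2, List.drop_eq_nil_of_le hle]
      simp only [List.take_nil, pvColRaw_nil, add_zero]
      rw [pvMapRangeGetD cl hcl]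

lemma pvAI_spec (text : List Char) (h8 : 8 ∣ text.length) (rounds : Nat) :
    ∀ n i acc, rounds - i = n →
      pvAI text rounds i (text.length - i * 80) acc =
        acc ++ (List.range' i (rounds - i)).map (fun r =>
          String.ofList ((List.range 8).flatMap
            (fun k => pvHex02 (pvColByte ((text.drop (r * 80)).take 80) k)))) := by
  intro n
  induction n with
  | zero =>
    intro i acc hn
    have hi : ¬ i < rounds := by omega
    rw [pvAI, dif_neg hi]
    have h0 : rounds - i = 0 := by omega
    rw [h0]
    simp
  | succ n ih =>
    intro i acc hn
    have hi : i < rounds := by omega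
    rw [pvAI, dif_pos hi]
    have hbase : (8 : Nat) ∣ i * 80 := ⟨i * 10, by ring⟩
    have hrem : text.length - i * 80 = text.length - (i * 80 + 8 * 0) := by omega
    rw [hrem,
        pvAJ_spec text h8 (i * 80) hbase 10 0 (List.replicate 8 0) rfl (by omega) (by simp)]
    simp only [Nat.add_zero, Nat.mul_zero, Nat.sub_zero]
    have hr2 : text.length - (i * 80 + 80) = text.length - (i + 1) * 80 := by omega
    rw [hr2, ih (i + 1) (acc ++ [_]) (by omega)]
    have hnn : rounds - i = n + 1 := by omega
    have hnn1 : rounds - (i + 1) = n := by omega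
    rw [hnn, hnn1, List.range'_succ, List.map_cons, List.append_assoc, List.singleton_append]
    have hhash :
        ((List.map (fun p => pvHex02 (PySem.Int.mod p 256))
            (List.map
              (fun k => (List.replicate 8 0).getD k 0 +
                pvColRaw (List.take (8 * 10) (List.drop (i * 80) text)) k)
              (List.range 8))).flatten : List Char) =
          List.flatMap (fun k => pvHex02 (pvColByte (List.take 80 (List.drop (i * 80) text)) k))
            (List.range 8) := by
      rw [List.flatMap_def, List.map_map]
      congr 1
      apply List.map_congr_left
      intro k hk
      norm_num [pvColByte, pvColRaw, Function.comp]
    rw [hhash]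

lemma pvPad_len_dvd (t : List Char) :
    (8 : Nat) ∣ (t ++ List.replicate (((t.length + 7) / 8) * 8 - t.length) ' ').length := by
  simp only [List.length_append, List.length_replicate]
  omega

-- ===== VERDICT (by name: the statement is the Claim_ definition above) =====
theorem TextHash64_real_spec : Claim_equal_TextHash64_real := by
  intro textin _
  unfold Spec_TextHash64_real TextHash64_real TextHash64_real_alt
  simp only [pvLjust]
  rw [PySem.List.foldl_append_eq_flatMap
      (fun t => t ++ List.replicate (((t.length + 7) / 8) * 8 - t.length) ' ')
      (PySem.Chars.splitOn textin.toList [' ']) [], List.nil_append]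
  set text := List.flatMap (fun t => t ++ List.replicate (((t.length + 7) / 8) * 8 - t.length) ' ')
    (PySem.Chars.splitOn textin.toList [' ']) with htext
  have h8 : 8 ∣ text.length := by
    rw [htext, List.length_flatMap]
    apply List.dvd_sum
    intro x hx
    simp only [List.mem_map] at hx
    obtain ⟨t, _, rfl⟩ := hx
    exact pvPad_len_dvd t
  have hmain := pvAI_spec text h8 (text.length / 80 + 1) (text.length / 80 + 1) 0 [] (by omega)
  rw [Nat.zero_mul, Nat.sub_zero, Nat.sub_zero, List.nil_append, ← List.range_eq_range'] at hmain
  exact hmain
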